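-- pv_equiv track=rewrite | github.com/heisje/Algorithm_Study | nimusmix/230301/표현 가능한 이진트리.py | solution
-- ===== SOURCE A (Python) =====
-- def check(binary, parent):
--     if parent == '0':
--         if not all(child == '0' for child in binary):
--             return False
--     if len(binary) == 1:
--         return True
--
--     m = len(binary) // 2
--     return check(binary[:m], binary[m]) and check(binary[m+1:], binary[m])
--
-- def solution(numbers):
--     answer = []
--
--     for number in numbers:
--         binary = bin(number)[2:]
--         digit = 0
--
--         for i in range(51):
--             digit = 2 ** i - 1
--             if digit >= len(binary):
--                 break
--
--         binary = '0' * (digit - len(binary)) + binary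
--         answer.append(1 if check(binary, binary[len(binary) // 2]) else 0)
--
--     return answer
-- ===== SOURCE B (Python) =====
-- def _judge(number):
--     binary = bin(number)[2:]
--     size = 1
--     while size < len(binary):
--         size = 2 * size + 1
--     binary = '0' * (size - len(binary)) + binary
--     stack = [(binary, binary[len(binary) // 2])]
--     while stack:
--         seg, parent = stack.pop()
--         if parent == '0' and any(c != '0' for c in seg):
--             return 0
--         if len(seg) < 2:
--             continue
--         m = len(seg) // 2
--         root = seg[m]
--         stack.append((seg[:m], root))
--         stack.append((seg[m + 1:], root))
--     return 1
--
--
-- def solution(numbers):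
--     return [_judge(n) for n in numbers]
-- ===== Notes on version B (the rewrite author's own statement) =====
-- stated objective: alternative
-- what changed: The recursive tree check is replaced by an iterative explicit-stack scan over (segment, parent) pairs, the padding-size search loop by a doubling while-loop, and the per-number work by a mapped helper with early return instead of an accumulator loop.
import Mathlib
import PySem

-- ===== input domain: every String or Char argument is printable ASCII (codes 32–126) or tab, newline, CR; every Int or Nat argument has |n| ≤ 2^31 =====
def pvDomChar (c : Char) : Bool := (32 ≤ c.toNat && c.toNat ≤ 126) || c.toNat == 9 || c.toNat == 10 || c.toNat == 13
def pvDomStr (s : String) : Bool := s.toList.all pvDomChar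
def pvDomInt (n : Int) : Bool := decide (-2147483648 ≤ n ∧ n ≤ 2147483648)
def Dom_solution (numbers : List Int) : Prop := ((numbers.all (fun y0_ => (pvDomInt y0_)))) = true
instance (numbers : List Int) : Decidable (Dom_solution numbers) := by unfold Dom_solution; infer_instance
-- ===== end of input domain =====

-- B replaces A's recursive tree check with an explicit-stack scan and A's padding-size
-- search loop with a doubling while-loop (alternative decomposition, same cost).

-- ===== PORT A =====

-- hand port of Python's built-in bin(n) for n ≥ 0, without the '0b' prefix; exact for all Nat
def pyBinNat (n : Nat) : List Char :=
  if _h : n < 2 then [if n = 1 then '1' else '0']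
  else pyBinNat (n / 2) ++ [if n % 2 = 1 then '1' else '0']
decreasing_by exact Nat.div_lt_self (by omega) (by omega)

-- bin(number)[2:]: for n ≥ 0 this drops '0b'; for n < 0 bin gives '-0b…' so [2:] leaves 'b…'
def pyBinTail (n : Int) : List Char :=
  if n < 0 then 'b' :: pyBinNat (-n).toNat else pyBinNat n.toNat

-- "for i in range(51): digit = 2**i - 1; if digit >= len(binary): break" (fuel = remaining iterations)
def digitLoopA (L : Nat) : Nat → Nat → Nat → Nat
  | 0, _, digit => digit
  | fuel + 1, i, _ =>
      let d := 2 ^ i - 1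
      if L ≤ d then d else digitLoopA L fuel (i + 1) d

def checkA (binary : List Char) (parent : Char) : Bool :=
  if parent == '0' && !(binary.all (· == '0')) then false
  else if binary.length == 1 then true
  else if binary.length == 0 then true
    -- on an empty segment Python raises IndexError at binary[m]; unreachable from solution
  else
    let m := binary.length / 2
    let r := binary.getD m ' '   -- binary[m]; in range since 2 ≤ length
    checkA (binary.take m) r && checkA (binary.drop (m + 1)) r
termination_by binary.length
decreasing_by
  all_goals simp only [List.length_take, List.length_drop, beq_iff_eq] at *
  all_goals omega

def solution (numbers : List Int) : List Int :=
  numbers.foldl (fun answer number =>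
    let binary := pyBinTail number
    let digit := digitLoopA binary.length 51 0 0
    let binary := List.replicate (digit - binary.length) '0' ++ binary
    answer ++ [if checkA binary (binary.getD (binary.length / 2) ' ') then 1 else 0]) []

-- ===== PORT B =====

-- "size = 1; while size < L: size = 2 * size + 1"
def sizeLoopB (L : Nat) (s : Nat) : Nat :=
  if s < L then sizeLoopB L (2 * s + 1) else s
termination_by L - s
decreasing_by omega

-- the explicit-stack scan; head of the list is the top of Python's stack
def stkLoopB : List (List Char × Char) → Bool
  | [] => true
  | (seg, parent) :: rest =>
      if parent == '0' && seg.any (· != '0') then false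
      else if seg.length < 2 then stkLoopB rest
      else
        let m := seg.length / 2
        let r := seg.getD m ' '   -- seg[m]; in range since 2 ≤ length
        stkLoopB ((seg.drop (m + 1), r) :: (seg.take m, r) :: rest)
termination_by stk => (stk.map (fun e => 2 * e.1.length + 1)).sum
decreasing_by
  · simp only [List.map_cons, List.sum_cons]; omega
  · simp only [List.map_cons, List.sum_cons, List.length_take, List.length_drop]; omega

def judgeB (number : Int) : Int :=
  let binary := pyBinTail number
  let size := sizeLoopB binary.length 1
  let binary := List.replicate (size - binary.length) '0' ++ binary
  if stkLoopB [(binary, binary.getD (binary.length / 2) ' ')] then 1 else 0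

def solution_alt (numbers : List Int) : List Int := numbers.map judgeB

-- ===== PRECONDITION & SPEC =====
def Spec_solution (numbers : List Int) (out : List Int) : Prop := out = solution_alt numbers
instance (numbers : List Int) (out : List Int) : Decidable (Spec_solution numbers out) := by unfold Spec_solution; infer_instance

-- ===== CLAIM (what is proved, stated in full; the proofs are below) =====
def Claim_equal_solution : Prop := ∀ (numbers : List Int), Dom_solution numbers → Spec_solution numbers (solution numbers)

-- ===== LEMMAS AND PROOFS =====

-- the two padding-size loops agree while enough fuel remains
theorem digit_eq_size (L : Nat) :
    ∀ fuel i d, L ≤ 2 ^ (i + fuel) - 1 →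
      digitLoopA L (fuel + 1) i d = sizeLoopB L (2 ^ i - 1) := by
  intro fuel
  induction fuel with
  | zero =>
      intro i d hB
      rw [digitLoopA, sizeLoopB]
      simp only [Nat.add_zero] at hB
      have : ¬ (2 ^ i - 1 < L) := by omega
      simp [hB, this]
  | succ fuel ih =>
      intro i d hB
      rw [digitLoopA, sizeLoopB]
      by_cases h : L ≤ 2 ^ i - 1
      · simp [h, Nat.not_lt.mpr h]
      · have hpow : 1 ≤ 2 ^ i := Nat.one_le_two_pow
        have hlt : 2 ^ i - 1 < L := by omega
        simp only [h, hlt, if_pos]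
        have h2 : 2 * (2 ^ i - 1) + 1 = 2 ^ (i + 1) - 1 := by
          have : 2 ^ (i + 1) = 2 * 2 ^ i := by ring
          omega
        rw [h2, ih (i + 1) (2 ^ i - 1) (by rw [show i + 1 + fuel = i + (fuel + 1) by omega]; exact hB)]
        simp

theorem pyBinNat_pos (n : Nat) : 1 ≤ (pyBinNat n).length := by
  rw [pyBinNat]
  split <;> simp

theorem pyBinNat_len_le (n : Nat) : ∀ k, n < 2 ^ (k + 1) → (pyBinNat n).length ≤ k + 1 := by
  induction n using Nat.strong_induction_on with
  | _ n ih =>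
      intro k hk
      rw [pyBinNat]
      split
      · simp
      · rename_i hn
        simp only [List.length_append, List.length_cons, List.length_nil]
        match k with
        | 0 => omega
        | k' + 1 =>
            have hdiv : n / 2 < 2 ^ (k' + 1) := by
              have : 2 ^ (k' + 1 + 1) = 2 * 2 ^ (k' + 1) := by ring
              omega
            have := ih (n / 2) (Nat.div_lt_self (by omega) (by omega)) k' hdiv
            omega

theorem pyBinTail_len (n : Int) (h1 : -2147483648 ≤ n) (h2 : n ≤ 2147483648) :
    1 ≤ (pyBinTail n).length ∧ (pyBinTail n).length ≤ 33 := by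
  rw [pyBinTail]
  split
  · rename_i hneg
    have hb : (-n).toNat < 2 ^ (31 + 1) := by omega
    have := pyBinNat_len_le (-n).toNat 31 hb
    have := pyBinNat_pos (-n).toNat
    simp only [List.length_cons]
    omega
  · rename_i hpos
    have hb : n.toNat < 2 ^ (31 + 1) := by omega
    have := pyBinNat_len_le n.toNat 31 hb
    have := pyBinNat_pos n.toNat
    omega

-- processing the top of the stack is the recursive check of that segment
theorem stk_eq_check : ∀ N seg parent rest, (seg : List Char).length ≤ N →
    stkLoopB ((seg, parent) :: rest) = (checkA seg parent && stkLoopB rest) := by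
  intro N
  induction N with
  | zero =>
      intro seg parent rest hlen
      have hnil : seg = [] := List.eq_nil_of_length_eq_zero (by omega)
      subst hnil
      rw [stkLoopB, checkA]
      simp
  | succ N ih =>
      intro seg parent rest hlen
      rw [stkLoopB, checkA]
      have hany : (seg.any fun x => x != '0') = !seg.all (fun x => x == '0') := by
        simp [List.all_eq_not_any_not, bne]
      rw [hany]
      by_cases hp : (parent == '0' && !(seg.all (· == '0'))) = true
      · simp [hp]
      · rcases Nat.lt_or_ge seg.length 2 with hlt2 | hge
        · have h01 : seg.length = 0 ∨ seg.length = 1 := by omega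
          rcases h01 with h01 | h01 <;> simp [hp, h01]
        · have h1 : ¬ seg.length = 1 := by omega
          have h0 : ¬ seg.length = 0 := by omega
          have hnlt : ¬ seg.length < 2 := by omega
          have htk : (seg.take (seg.length / 2)).length ≤ N := by
            simp only [List.length_take]; omega
          have hdr : (seg.drop (seg.length / 2 + 1)).length ≤ N := by
            simp only [List.length_drop]; omega
          simp only [hp, Bool.false_eq_true, if_false, if_neg hnlt, beq_iff_eq,
            if_neg h1, if_neg h0]
          rw [ih _ _ _ hdr, ih _ _ _ htk]
          cases checkA (seg.take (seg.length / 2)) (seg.getD (seg.length / 2) ' ') <;>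
            cases checkA (seg.drop (seg.length / 2 + 1)) (seg.getD (seg.length / 2) ' ') <;>
            simp

theorem foldl_append_map (f : Int → Int) :
    ∀ (xs : List Int) (acc : List Int),
      xs.foldl (fun a x => a ++ [f x]) acc = acc ++ xs.map f := by
  intro xs
  induction xs with
  | nil => simp
  | cons x xs ih => intro acc; simp [List.foldl_cons, ih, List.append_assoc]

-- the per-number bodies agree on the domain
theorem body_eq (n : Int) (h1 : -2147483648 ≤ n) (h2 : n ≤ 2147483648) :
    (let binary := pyBinTail n
     let digit := digitLoopA binary.length 51 0 0
     let binary := List.replicate (digit - binary.length) '0' ++ binary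
     (if checkA binary (binary.getD (binary.length / 2) ' ') then (1 : Int) else 0)) = judgeB n := by
  obtain ⟨hlo, hhi⟩ := pyBinTail_len n h1 h2
  rw [judgeB]
  have hdig : digitLoopA (pyBinTail n).length 51 0 0 = sizeLoopB (pyBinTail n).length 1 := by
    rw [show (51 : Nat) = 50 + 1 from rfl, digitLoopA]
    have h0 : ¬ ((pyBinTail n).length ≤ 2 ^ 0 - 1) := by omega
    simp only [h0, if_false]
    have := digit_eq_size (pyBinTail n).length 49 1 (2 ^ 0 - 1)
      (by norm_num; omega)
    simpa using this
  simp only [hdig]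
  rw [stk_eq_check (List.replicate (sizeLoopB (pyBinTail n).length 1 - (pyBinTail n).length) '0' ++ pyBinTail n).length _ _ _ (le_refl _)]
  rw [stkLoopB]
  simp

-- ===== VERDICT (by name: the statement is the Claim_ definition above) =====
theorem solution_spec : Claim_equal_solution := by
  intro numbers hdom
  unfold Spec_solution solution solution_alt
  unfold Dom_solution at hdom
  simp only [List.all_eq_true, pvDomInt, decide_eq_true_eq] at hdom
  rw [foldl_append_map (fun number =>
    let binary := pyBinTail number
    let digit := digitLoopA binary.length 51 0 0
    let binary := List.replicate (digit - binary.length) '0' ++ binary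
    (if checkA binary (binary.getD (binary.length / 2) ' ') then (1 : Int) else 0))]
  simp only [List.nil_append]
  apply List.map_congr_left
  intro n hn
  obtain ⟨h1, h2⟩ := hdom n hn
  exact body_eq n h1 h2
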